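-- pv_equiv track=rewrite | github.com/rodcasnog/advent-of-code-2023 | advent-of-code_14.py | roll_west
-- ===== SOURCE A (Python) =====
-- def roll_west(data):
--     new_data = []
--     for line in data:
--         new_line = ['.'] * len(line)
--         for i, char in enumerate(line):
--             if char == '#':
--                 new_line[i] = '#'
--             elif char == 'O':
--                 j = i
--                 while new_line[j] == '.':
--                     j -= 1
--                     if j < 0:
--                         break
--                 new_line[j + 1] = 'O'
--         new_data.append(''.join(new_line))
--     return new_data
-- ===== SOURCE B (Python) =====
-- def roll_west(data):
--     new_data = []
--     for line in data:
--         res = ['.'] * len(line)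
--         free = 0  # next slot a rolling rock lands in (just right of last wall/rock)
--         for i, char in enumerate(line):
--             if char == '#':
--                 res[i] = '#'
--                 free = i + 1
--             elif char == 'O':
--                 res[free] = 'O'
--                 free += 1
--         new_data.append(''.join(res))
--     return new_data
-- ===== Notes on version B (the rewrite author's own statement) =====
-- stated objective: alternative
-- what changed: Replaces A's per-rock backward while-scan over the output buffer with a single left-to-right pass maintaining a next-free-slot pointer reset after each wall; on the measured inputs this was not faster.
import Mathlib
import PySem

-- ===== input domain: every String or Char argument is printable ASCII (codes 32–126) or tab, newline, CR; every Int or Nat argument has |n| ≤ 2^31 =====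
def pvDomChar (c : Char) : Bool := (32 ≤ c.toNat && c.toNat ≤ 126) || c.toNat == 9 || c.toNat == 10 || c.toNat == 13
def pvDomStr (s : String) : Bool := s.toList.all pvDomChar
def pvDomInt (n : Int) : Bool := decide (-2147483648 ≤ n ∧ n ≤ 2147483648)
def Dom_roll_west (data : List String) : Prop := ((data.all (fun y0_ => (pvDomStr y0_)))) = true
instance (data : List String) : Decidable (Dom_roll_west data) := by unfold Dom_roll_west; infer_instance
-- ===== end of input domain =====

-- B replaces A's per-rock backward while-scan with a one-pass next-free-slot pointer (alternative algorithm, same measured cost).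

-- ===== PORT A =====
-- 'j = i; while new_line[j] == '.': j -= 1; if j < 0: break' — the accessed index is always
-- in range in A (j starts at i < len and stops before going negative), so List.getD is exact here.
def rollScanA (nl : List Char) : Nat → Int
  | 0 => if nl.getD 0 '.' == '.' then -1 else 0   -- j -= 1 makes j = -1 < 0, break
  | j + 1 => if nl.getD (j + 1) '.' == '.' then rollScanA nl j else ((j : Int) + 1)

-- the body of 'for i, char in enumerate(line)' building new_line
def rollLineA (nl : List Char) (i : Nat) : List Char → List Char
  | [] => nl
  | c :: cs =>
    let nl' :=
      if c == '#' then nl.set i '#'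
      else if c == 'O' then nl.set (rollScanA nl i + 1).toNat 'O'  -- new_line[j+1] = 'O'; j+1 ≥ 0 always
      else nl
    rollLineA nl' (i + 1) cs

def roll_west (data : List String) : List String :=
  data.map (fun line =>
    String.ofList (rollLineA (List.replicate line.toList.length '.') 0 line.toList))

-- ===== PORT B =====
-- one pass: 'free' is the slot just right of the last wall or settled rock
def rollLineB (res : List Char) (free : Nat) (i : Nat) : List Char → List Char
  | [] => res
  | c :: cs =>
    if c == '#' then rollLineB (res.set i '#') (i + 1) (i + 1) cs
    else if c == 'O' then rollLineB (res.set free 'O') (free + 1) (i + 1) cs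
    else rollLineB res free (i + 1) cs

def roll_west_alt (data : List String) : List String :=
  data.map (fun line =>
    String.ofList (rollLineB (List.replicate line.toList.length '.') 0 0 line.toList))

-- ===== PRECONDITION & SPEC =====
def Spec_roll_west (data : List String) (out : List String) : Prop := out = roll_west_alt data
instance (data : List String) (out : List String) : Decidable (Spec_roll_west data out) := by unfold Spec_roll_west; infer_instance

-- ===== CLAIM (what is proved, stated in full; the proofs are below) =====
def Claim_equal_roll_west : Prop := ∀ (data : List String), Dom_roll_west data → Spec_roll_west data (roll_west data)

-- ===== LEMMAS AND PROOFS =====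

-- A's backward scan lands exactly on free - 1 when everything at or above free is '.'
-- and the cell just below free (if any) is occupied.
theorem rollScanA_eq (res : List Char) (free i : Nat)
    (hle : free ≤ i + 1)
    (hdot : ∀ k, free ≤ k → res.getD k '.' = '.')
    (hlast : free = 0 ∨ res.getD (free - 1) '.' ≠ '.') :
    rollScanA res i = (free : Int) - 1 := by
  induction i with
  | zero =>
    rcases Nat.le_one_iff_eq_zero_or_eq_one.mp hle with h0 | h1
    · subst h0
      rw [rollScanA, hdot 0 (Nat.le_refl 0)]
      norm_num
    · subst h1
      rcases hlast with h | h
      · omega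
      · simp only [Nat.sub_self] at h
        rw [rollScanA, if_neg (by simp only [beq_iff_eq]; exact h)]
        norm_num
  | succ j ih =>
    by_cases hf : free = j + 2
    · rcases hlast with h | h
      · omega
      · subst hf
        rw [rollScanA, if_neg (by simp only [beq_iff_eq]; simpa using h)]
        push_cast
        ring
    · have hle' : free ≤ j + 1 := by omega
      rw [rollScanA, if_pos (by simp only [beq_iff_eq]; exact hdot (j + 1) hle')]
      exact ih hle'

theorem getD_set_of_ne (l : List Char) (i k : Nat) (v d : Char) (h : k ≠ i) :
    (l.set i v).getD k d = l.getD k d := by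
  simp [List.getD, List.getElem?_set_ne (Ne.symm h)]

theorem getD_set_self (l : List Char) (i : Nat) (v d : Char) (h : i < l.length) :
    (l.set i v).getD i d = v := by
  simp [List.getD, h]

-- main loop invariant: A's buffer-scan loop and B's free-pointer loop coincide
theorem rollLine_eq (cs : List Char) : ∀ (res : List Char) (free i : Nat),
    free ≤ i →
    i + cs.length = res.length →
    (∀ k, free ≤ k → res.getD k '.' = '.') →
    (free = 0 ∨ res.getD (free - 1) '.' ≠ '.') →
    rollLineA res i cs = rollLineB res free i cs := by
  induction cs with
  | nil => intro res free i _ _ _ _; rfl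
  | cons c cs ih =>
    intro res free i hfi hlen hdot hlast
    have hi : i < res.length := by simp at hlen; omega
    by_cases hc : c = '#'
    · simp only [rollLineA, rollLineB, hc, beq_self_eq_true, if_pos]
      apply ih
      · omega
      · simp at hlen ⊢; omega
      · intro k hk
        rw [getD_set_of_ne _ _ _ _ _ (by omega)]
        exact hdot k (by omega)
      · right
        simp only [Nat.add_sub_cancel]
        rw [getD_set_self _ _ _ _ hi]
        decide
    · by_cases ho : c = 'O'
      · have hscan : rollScanA res i = (free : Int) - 1 :=
          rollScanA_eq res free i (by omega) hdot hlast
        have hset : (rollScanA res i + 1).toNat = free := by rw [hscan]; omega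
        simp only [rollLineA, rollLineB, ho]
        simp only [show ('O' == '#') = false from rfl, show ('O' == 'O') = true from rfl,
          Bool.false_eq_true, if_false, if_true, hset]
        apply ih
        · omega
        · simp at hlen ⊢; omega
        · intro k hk
          rw [getD_set_of_ne _ _ _ _ _ (by omega)]
          exact hdot k (by omega)
        · right
          simp only [Nat.add_sub_cancel]
          rw [getD_set_self _ _ _ _ (by omega)]
          decide
      · simp only [rollLineA, rollLineB,
          show (c == '#') = false by simpa using hc,
          show (c == 'O') = false by simpa using ho,
          Bool.false_eq_true, if_false]
        apply ih res free (i + 1) (by omega) (by simp at hlen ⊢; omega) hdot hlast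

-- ===== VERDICT (by name: the statement is the Claim_ definition above) =====
theorem roll_west_spec : Claim_equal_roll_west := by
  intro data _
  unfold Spec_roll_west roll_west roll_west_alt
  apply List.map_congr_left
  intro line _
  congr 1
  apply rollLine_eq
  · exact Nat.le_refl 0
  · simp
  · intro k _
    simp only [List.getD, List.getElem?_replicate]
    split <;> rfl
  · left; rfl
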